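-- pv_equiv track=rewrite | github.com/dkekzhs/coding-test-practice | programmers/lv1/report.py | solution
-- ===== SOURCE A (Python) =====
-- from collections import defaultdict
--
-- def solution(id_list, report, k):
--     answer = []
--     report = list(set(report))
--     user = defaultdict(set)
--     cnt = defaultdict(int)
--
--     for i in report:
--         a , b = i.split()
--         user[a].add(b)
--         cnt[b] += 1
--
--     for id in id_list:
--         result = 0
--         for u in user[id]:
--             if(cnt[u] >=k):
--                 result +=1
--         answer.append(result)
--
--     return answer
-- ===== SOURCE B (Python) =====
-- def solution(id_list, report, k):
--     # Sort the (reporter, reported) pairs by (reported, reporter); each run of equal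
--     # 'reported' values has length == number of distinct report strings naming it,
--     # and duplicate pairs inside a run are adjacent, so a prev-skip dedupes them.
--     pairs = sorted((tuple(r.split()) for r in set(report)), key=lambda p: (p[1], p[0]))
--     res = {}
--     i, n = 0, len(pairs)
--     while i < n:
--         j = i
--         while j < n and pairs[j][1] == pairs[i][1]:
--             j += 1
--         if j - i >= k:
--             prev = None
--             for a, _ in pairs[i:j]:
--                 if a != prev:
--                     res[a] = res.get(a, 0) + 1
--                 prev = a
--         i = j
--     return [res.get(x, 0) for x in id_list]
-- ===== Notes on version B (the rewrite author's own statement) =====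
-- stated objective: alternative
-- what changed: A builds a reporter->reported-set hash map plus a count dict and scans the set per id; B uses no per-user map at all: it sorts the report pairs by (reported, reporter), detects each equal-'reported' run whose length is the report count, dedupes duplicate pairs by comparing with the previous element, and accumulates one result dict read per id.
import Mathlib
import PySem

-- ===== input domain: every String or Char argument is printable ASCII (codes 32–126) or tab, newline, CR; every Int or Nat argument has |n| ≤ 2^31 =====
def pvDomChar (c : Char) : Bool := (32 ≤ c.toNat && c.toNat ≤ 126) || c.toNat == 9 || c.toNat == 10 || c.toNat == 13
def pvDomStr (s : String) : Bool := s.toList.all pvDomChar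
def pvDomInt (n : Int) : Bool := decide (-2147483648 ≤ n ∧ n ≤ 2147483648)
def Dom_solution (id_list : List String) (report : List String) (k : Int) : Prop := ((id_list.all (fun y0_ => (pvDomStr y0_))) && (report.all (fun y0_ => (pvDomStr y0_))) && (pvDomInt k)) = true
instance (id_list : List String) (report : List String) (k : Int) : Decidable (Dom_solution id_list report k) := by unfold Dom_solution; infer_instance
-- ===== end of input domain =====

-- B drops A's reporter→reported-set map entirely: it sorts the report pairs by (reported, reporter),
-- reads each equal-'reported' run's length as that user's report count and dedupes duplicate pairs by
-- adjacency (alternative algorithm; return value only — A also mutates its defaultdict on lookup,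
-- which the caller cannot observe here).


-- ===== PORT A =====
-- 'a, b = i.split()' — exact under Pre_ (the split has exactly two tokens; otherwise Python raises ValueError)
def pvSplit2 (r : String) : String × String :=
  let p := PySem.Str.split₀ r
  (p.getD 0 "", p.getD 1 "")

def solution (id_list : List String) (report : List String) (k : Int) : List Int :=
  let rep := PySem.Set.ofList report
  -- one loop, two accumulators: user (defaultdict(set)) and cnt (defaultdict(int))
  let st := rep.foldl
    (fun (s : PySem.Dict String (PySem.Set String) × PySem.Dict String Int) i =>
      (s.1.insert (pvSplit2 i).1 (PySem.Set.add (s.1.getD (pvSplit2 i).1 PySem.Set.empty) (pvSplit2 i).2),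
       s.2.modify (pvSplit2 i).2 0 (· + 1)))
    (PySem.Dict.empty, PySem.Dict.empty)
  -- 'user[id]' on the defaultdict reads the set (inserting an empty set on a miss, which cannot
  -- change any later read value, so the port reads with getD); the inner loop counts, so the
  -- set's iteration order cannot affect the result
  id_list.foldl
    (fun answer id =>
      answer ++ [(st.1.getD id PySem.Set.empty).foldl
        (fun result u => if st.2.getD u 0 ≥ k then result + 1 else result) 0])
    []

-- ===== PORT B =====
-- the outer 'while i < n' / inner 'while j < n and pairs[j][1] == pairs[i][1]' index scan:
-- each iteration isolates the run pairs[i:j] of equal second components (takeWhile) and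
-- continues on pairs[j:] (dropWhile); 'prev' is None before the run's inner for-loop
def pvRunLoop (k : Int) (res : PySem.Dict String Int) : List (String × String) → PySem.Dict String Int
  | [] => res
  | p :: rest =>
    let run := (p :: rest).takeWhile (fun q => q.2 == p.2)
    let rest' := (p :: rest).dropWhile (fun q => q.2 == p.2)
    let res' := if ((run.length : Int) ≥ k) then
        (run.foldl
          (fun (s : PySem.Dict String Int × Option String) q =>
            (if some q.1 ≠ s.2 then s.1.insert q.1 (s.1.getD q.1 0 + 1) else s.1, some q.1))
          (res, none)).1
      else res
    pvRunLoop k res' rest'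
termination_by l => l.length
decreasing_by
  simp only [List.dropWhile_cons]
  rw [if_pos (by simp)]
  exact Nat.lt_succ_of_le (List.length_dropWhile_le _ _)

def solution_alt (id_list : List String) (report : List String) (k : Int) : List Int :=
  -- sorted(..., key=lambda p: (p[1], p[0])) over the deduplicated report strings' pairs
  let pairs := PySem.List.sorted2 ((PySem.Set.ofList report).map pvSplit2) (fun p => p.2) (fun p => p.1)
  let res := pvRunLoop k PySem.Dict.empty pairs
  id_list.map (fun x => res.getD x 0)

-- ===== PRECONDITION & SPEC =====
-- Pre_ excludes reports that do not split into exactly two whitespace-separated tokens: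
-- there A's 'a, b = i.split()' raises ValueError (and B's own indexing/unpacking raises too).
def Pre_solution (id_list : List String) (report : List String) (k : Int) : Prop :=
  ∀ r ∈ report, (PySem.Str.split₀ r).length = 2
instance (id_list : List String) (report : List String) (k : Int) : Decidable (Pre_solution id_list report k) := by unfold Pre_solution; infer_instance

def pvWitness_solution : List String × List String × Int := (["muzi", "frodo"], ["muzi frodo", "apeach frodo"], 2)

def Spec_solution (id_list : List String) (report : List String) (k : Int) (out : List Int) : Prop := out = solution_alt id_list report k
instance (id_list : List String) (report : List String) (k : Int) (out : List Int) : Decidable (Spec_solution id_list report k out) := by unfold Spec_solution; infer_instance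

-- ===== CLAIM (what is proved, stated in full; the proofs are below) =====
def Claim_equal_solution : Prop := ∀ (id_list : List String) (report : List String) (k : Int), Dom_solution id_list report k → Pre_solution id_list report k → Spec_solution id_list report k (solution id_list report k)

-- ===== LEMMAS AND PROOFS =====

-- the common yardstick both sides are reduced to: the number of DISTINCT reported users b
-- with (id, b) among the pairs and at least k occurrences of b among the pairs' seconds
def pvBandCount (k : Int) (id : String) (l : List (String × String)) : Nat :=
  (PySem.Set.ofList (l.map Prod.snd)).countP
    (fun b => decide ((id, b) ∈ l) && decide (k ≤ ((l.map Prod.snd).count b : Int)))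

-- A's first loop restricted to the user map, as a fold over the (reporter, reported) pairs
def userOf (l : List (String × String)) : PySem.Dict String (PySem.Set String) :=
  l.foldl (fun d p => d.insert p.1 (PySem.Set.add (d.getD p.1 PySem.Set.empty) p.2)) PySem.Dict.empty

theorem userOf_append (t : List (String × String)) (p : String × String) :
    userOf (t ++ [p]) = (userOf t).insert p.1 (PySem.Set.add ((userOf t).getD p.1 PySem.Set.empty) p.2) := by
  simp [userOf, List.foldl_append]

theorem mem_userOf (l : List (String × String)) (a b : String) :
    b ∈ (userOf l).getD a PySem.Set.empty ↔ (a, b) ∈ l := by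
  induction l using List.reverseRecOn with
  | nil => simp [userOf, PySem.Dict.getD_empty, PySem.Set.empty]
  | append_singleton t p ih =>
    obtain ⟨x, y⟩ := p
    rw [userOf_append, PySem.Dict.getD_insert]
    by_cases hax : a = x
    · subst hax
      simp [PySem.Set.mem_add]
      tauto
    · rw [if_neg hax, ih]
      simp [hax]

theorem nodup_userOf (l : List (String × String)) (a : String) :
    ((userOf l).getD a PySem.Set.empty).Nodup := by
  induction l using List.reverseRecOn with
  | nil => simp [userOf, PySem.Dict.getD_empty, PySem.Set.empty]
  | append_singleton t p ih =>
    rw [userOf_append, PySem.Dict.getD_insert]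
    by_cases hax : a = p.1
    · rw [if_pos hax]
      exact PySem.Set.nodup_add _ _ (hax ▸ ih)
    · rw [if_neg hax]; exact ih

-- two nodup lists carrying pointwise-matching predicates have the same countP
theorem countP_eq_of_nodup_mem {α : Type} [DecidableEq α] (l₁ l₂ : List α) (p₁ p₂ : α → Bool)
    (h₁ : l₁.Nodup) (h₂ : l₂.Nodup)
    (h : ∀ x, (x ∈ l₁ ∧ p₁ x = true) ↔ (x ∈ l₂ ∧ p₂ x = true)) :
    l₁.countP p₁ = l₂.countP p₂ := by
  have hp : (l₁.filter p₁).Perm (l₂.filter p₂) := by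
    rw [List.perm_ext_iff_of_nodup (h₁.filter _) (h₂.filter _)]
    intro x
    simpa only [List.mem_filter] using h x
  simpa [List.countP_eq_length_filter] using hp.length_eq

-- sorted2 with keys (snd, fst) is sorted with the lexicographic pair key
theorem sorted2_eq_sorted_toLex (xs : List (String × String)) :
    PySem.List.sorted2 xs (fun p => p.2) (fun p => p.1) false
      = PySem.List.sorted xs (fun p => toLex (p.2, p.1)) false := by
  rw [PySem.List.sorted_eq_foldl_insertBy]
  unfold PySem.List.sorted2
  simp only [Bool.false_eq_true, if_false]
  have hfun : (fun (a b : String × String) => decide (a.2 < b.2) || (!decide (b.2 < a.2) && decide (a.1 < b.1)))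
      = (fun (a b : String × String) => decide (toLex (a.2, a.1) < toLex (b.2, b.1))) := by
    funext a b
    by_cases h1 : a.2 < b.2
    · simp [h1, Prod.Lex.lt_iff]
    · by_cases h2 : b.2 < a.2
      · simp [h1, h2, Prod.Lex.lt_iff, ne_of_gt h2]
      · have heq : a.2 = b.2 := le_antisymm (not_lt.mp h2) (not_lt.mp h1)
        simp [heq, Prod.Lex.lt_iff]
  rw [hfun]

theorem sorted_pairs_pairwise (xs : List (String × String)) :
    (PySem.List.sorted2 xs (fun p => p.2) (fun p => p.1) false).Pairwise
      (fun p q => toLex (p.2, p.1) ≤ toLex (q.2, q.1)) := by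
  rw [sorted2_eq_sorted_toLex]
  exact PySem.List.sorted_pairwise _ _

-- the inner prev-skip fold over one run: +1 exactly when id is among the run's reporters
theorem innerFold_getD (res : PySem.Dict String Int) (prev : Option String)
    (run : List (String × String)) (id : String)
    (hpw : (run.map Prod.fst).Pairwise (· ≤ ·))
    (hlb : ∀ v, prev = some v → ∀ q ∈ run, v ≤ q.1) :
    ((run.foldl
        (fun (s : PySem.Dict String Int × Option String) q =>
          (if some q.1 ≠ s.2 then s.1.insert q.1 (s.1.getD q.1 0 + 1) else s.1, some q.1))
        (res, prev)).1).getD id 0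
      = res.getD id 0 + (if id ∈ run.map Prod.fst ∧ prev ≠ some id then 1 else 0) := by
  induction run generalizing res prev with
  | nil => simp
  | cons q t ih =>
    rw [List.map_cons] at hpw
    have hq : ∀ x ∈ t, q.1 ≤ x.1 := fun x hx =>
      (List.pairwise_cons.mp hpw).1 x.1 (List.mem_map.mpr ⟨x, hx, rfl⟩)
    have hpw' : (t.map Prod.fst).Pairwise (· ≤ ·) := (List.pairwise_cons.mp hpw).2
    have hlb' : ∀ v, (some q.1 : Option String) = some v → ∀ x ∈ t, v ≤ x.1 := by
      intro v hv x hx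
      injection hv with hv
      exact hv ▸ hq x hx
    simp only [List.foldl_cons]
    by_cases hskip : some q.1 = prev
    · rw [if_neg (by simp [hskip])]
      rw [ih res (some q.1) hpw' hlb']
      rw [← hskip]
      by_cases hid : id = q.1
      · subst hid; simp
      · by_cases hmem : id ∈ t.map Prod.fst <;> simp [hid, hmem]
    · rw [if_pos (by simpa using hskip)]
      rw [ih _ (some q.1) hpw' hlb']
      by_cases hid : id = q.1
      · subst hid
        rw [PySem.Dict.getD_insert, if_pos rfl]
        have h2 : ¬ prev = some q.1 := fun h => hskip h.symm
        simp [h2]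
      · rw [PySem.Dict.getD_insert, if_neg hid]
        by_cases hprev : prev = some id
        · have hnot : id ∉ t.map Prod.fst := by
            intro hmem
            obtain ⟨x, hx, hx1⟩ := List.mem_map.mp hmem
            have h1 : id ≤ q.1 := hlb id hprev q (List.mem_cons_self ..)
            have h2 : q.1 ≤ id := hx1 ▸ hq x hx
            exact hid (le_antisymm h1 h2)
          simp [hnot, hprev, hid]
        · by_cases hmem : id ∈ t.map Prod.fst <;> simp [hid, Ne.symm hid, hprev, hmem]


theorem lex_fst_le {a b : String × String} (h : toLex (a.2, a.1) ≤ toLex (b.2, b.1)) : a.2 ≤ b.2 := by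
  rcases Prod.Lex.le_iff.mp h with h' | ⟨h', _⟩
  · exact le_of_lt (by simpa using h')
  · exact le_of_eq (by simpa using h')
theorem run_snd_eq (p : String × String) (rest : List (String × String)) :
    ∀ q ∈ (p :: rest).takeWhile (fun q => q.2 == p.2), q.2 = p.2 := by
  intro q hq
  simpa using List.mem_takeWhile_imp hq
theorem rest_snd_gt (p : String × String) (rest : List (String × String))
    (hpw : (p :: rest).Pairwise (fun a b => toLex (a.2, a.1) ≤ toLex (b.2, b.1))) :
    ∀ q ∈ (p :: rest).dropWhile (fun q => q.2 == p.2), p.2 < q.2 := by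
  intro q hq
  rw [List.dropWhile_cons, if_pos (by simp)] at hq
  rcases hd : rest.dropWhile (fun q => q.2 == p.2) with _ | ⟨r1, rtail⟩
  · rw [hd] at hq; simp at hq
  · have hne : (r1.2 == p.2) = false := by
      have h := List.head_dropWhile_not (fun q : String × String => q.2 == p.2)
        (l := rest) (by rw [hd]; simp)
      simp only [hd, List.head_cons] at h
      exact h
    have hsub : (r1 :: rtail).Sublist rest := hd ▸ List.dropWhile_sublist _
    have hkey : ∀ x ∈ rest, toLex (p.2, p.1) ≤ toLex (x.2, x.1) :=
      (List.pairwise_cons.mp hpw).1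
    have hbr1 : p.2 < r1.2 := by
      have h1 : p.2 ≤ r1.2 := lex_fst_le (hkey r1 (hsub.subset (List.mem_cons_self ..)))
      have h2 : r1.2 ≠ p.2 := by simpa using hne
      exact lt_of_le_of_ne h1 (Ne.symm h2)
    rw [hd] at hq
    rcases List.mem_cons.mp hq with rfl | hq'
    · exact hbr1
    · have hpw' : (r1 :: rtail).Pairwise (fun a b => toLex (a.2, a.1) ≤ toLex (b.2, b.1)) :=
        List.Pairwise.sublist (hsub.trans (List.sublist_cons_self p rest)) hpw
      exact lt_of_lt_of_le hbr1 (lex_fst_le ((List.pairwise_cons.mp hpw').1 q hq'))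
theorem run_fst_pairwise (p : String × String) (rest : List (String × String))
    (hpw : (p :: rest).Pairwise (fun a b => toLex (a.2, a.1) ≤ toLex (b.2, b.1))) :
    (((p :: rest).takeWhile (fun q => q.2 == p.2)).map Prod.fst).Pairwise (· ≤ ·) := by
  rw [List.pairwise_map]
  have hpw_run := List.Pairwise.sublist (List.takeWhile_sublist (fun q : String × String => q.2 == p.2)) hpw
  refine hpw_run.imp_of_mem ?_
  intro a b ha hb h
  have ha2 := run_snd_eq p rest a ha
  have hb2 := run_snd_eq p rest b hb
  rcases Prod.Lex.le_iff.mp h with h' | ⟨_, h'⟩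
  · exfalso
    have : a.2 < b.2 := by simpa using h'
    rw [ha2, hb2] at this
    exact lt_irrefl _ this
  · simpa using h'

-- one outer-loop step of B's scan splits pvBandCount into the head run's contribution and the rest
theorem pvBandCount_step (k : Int) (id : String) (p : String × String) (rest : List (String × String))
    (hpw : ((p :: rest)).Pairwise (fun a b => toLex (a.2, a.1) ≤ toLex (b.2, b.1))) :
    pvBandCount k id (p :: rest)
      = (if (k ≤ (((p :: rest).takeWhile (fun q => q.2 == p.2)).length : Int))
            ∧ id ∈ ((p :: rest).takeWhile (fun q => q.2 == p.2)).map Prod.fst then 1 else 0)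
        + pvBandCount k id ((p :: rest).dropWhile (fun q => q.2 == p.2)) := by
  have hsplit : ((p :: rest).takeWhile (fun q => q.2 == p.2)) ++ ((p :: rest).dropWhile (fun q => q.2 == p.2)) = p :: rest :=
    List.takeWhile_append_dropWhile
  set run := (p :: rest).takeWhile (fun q => q.2 == p.2) with hrun
  set rest' := (p :: rest).dropWhile (fun q => q.2 == p.2) with hrest'
  have hrunsnd := run_snd_eq p rest
  have hrestgt := rest_snd_gt p rest hpw
  have hnotmem : p.2 ∉ rest'.map Prod.snd := by
    intro hm
    obtain ⟨q, hq, hq2⟩ := List.mem_map.mp hm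
    exact absurd (hq2 ▸ hrestgt q hq) (lt_irrefl _)
  have hrun_cons : run = p :: rest.takeWhile (fun q => q.2 == p.2) :=
    List.takeWhile_cons_of_pos (by simp)
  have hcount_b : (((p :: rest)).map Prod.snd).count p.2 = run.length := by
    rw [← hsplit, List.map_append, List.count_append]
    have h1 : (run.map Prod.snd).count p.2 = run.length := by
      rw [List.count_eq_length.mpr ?_, List.length_map]
      intro b hb
      obtain ⟨q, hq, hq2⟩ := List.mem_map.mp hb
      exact (hq2 ▸ hrunsnd q hq).symm
    have h2 : (rest'.map Prod.snd).count p.2 = 0 := List.count_eq_zero.mpr hnotmem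
    omega
  have hcount_ne : ∀ x, x ≠ p.2 → (((p :: rest)).map Prod.snd).count x = (rest'.map Prod.snd).count x := by
    intro x hx
    rw [← hsplit, List.map_append, List.count_append]
    have h0 : (run.map Prod.snd).count x = 0 := List.count_eq_zero.mpr (by
      intro hm
      obtain ⟨q, hq, hq2⟩ := List.mem_map.mp hm
      exact hx (hq2 ▸ hrunsnd q hq))
    omega
  have hmem_b : ((id, p.2) ∈ (p :: rest)) ↔ id ∈ run.map Prod.fst := by
    constructor
    · intro hm
      rw [← hsplit] at hm
      rcases List.mem_append.mp hm with hm | hm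
      · exact List.mem_map.mpr ⟨(id, p.2), hm, rfl⟩
      · exact absurd (hrestgt _ hm) (lt_irrefl _)
    · intro hm
      obtain ⟨q, hq, hq1⟩ := List.mem_map.mp hm
      have hqe : q = (id, p.2) := by
        obtain ⟨q1, q2⟩ := q
        simp only [Prod.mk.injEq]
        exact ⟨hq1, hrunsnd _ hq⟩
      rw [← hqe]
      exact (List.takeWhile_sublist _).subset hq
  have hmem_ne : ∀ x, x ≠ p.2 → (((id, x) ∈ (p :: rest)) ↔ (id, x) ∈ rest') := by
    intro x hx
    rw [← hsplit, List.mem_append]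
    constructor
    · rintro (hm | hm)
      · exact absurd (hrunsnd _ hm) hx
      · exact hm
    · exact fun hm => Or.inr hm
  unfold pvBandCount
  rw [countP_eq_of_nodup_mem
      (PySem.Set.ofList (((p :: rest)).map Prod.snd))
      (p.2 :: PySem.Set.ofList (rest'.map Prod.snd))
      (fun b => decide ((id, b) ∈ (p :: rest)) && decide (k ≤ ((((p :: rest)).map Prod.snd).count b : Int)))
      (fun b => decide ((id, b) ∈ (p :: rest)) && decide (k ≤ ((((p :: rest)).map Prod.snd).count b : Int)))
      (PySem.Set.nodup_ofList _)
      (List.nodup_cons.mpr ⟨by rw [PySem.Set.mem_ofList]; exact hnotmem, PySem.Set.nodup_ofList _⟩)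
      ?_]
  · rw [List.countP_cons]
    have hif : ((decide ((id, p.2) ∈ (p :: rest)) && decide (k ≤ ((((p :: rest)).map Prod.snd).count p.2 : Int))) = true)
        ↔ ((k ≤ ((run.length : Nat) : Int)) ∧ id ∈ run.map Prod.fst) := by
      simp only [Bool.and_eq_true, decide_eq_true_eq]
      rw [hmem_b, hcount_b]
      exact and_comm
    rw [if_congr hif rfl rfl]
    have htail : (PySem.Set.ofList (rest'.map Prod.snd)).countP
          (fun b => decide ((id, b) ∈ (p :: rest)) && decide (k ≤ ((((p :: rest)).map Prod.snd).count b : Int)))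
        = (PySem.Set.ofList (rest'.map Prod.snd)).countP
          (fun b => decide ((id, b) ∈ rest') && decide (k ≤ ((rest'.map Prod.snd).count b : Int))) := by
      apply List.countP_congr
      intro x hx
      have hxmem : x ∈ rest'.map Prod.snd := (PySem.Set.mem_ofList _ _).mp hx
      have hxne : x ≠ p.2 := by
        obtain ⟨q, hq, hq2⟩ := List.mem_map.mp hxmem
        exact hq2 ▸ ne_of_gt (hrestgt q hq)
      simp only [Bool.and_eq_true, decide_eq_true_eq]
      rw [hmem_ne x hxne, hcount_ne x hxne]
    rw [htail]
    omega
  · intro x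
    have hmm : x ∈ ((p :: rest)).map Prod.snd ↔ (x = p.2 ∨ x ∈ rest'.map Prod.snd) := by
      rw [← hsplit, List.map_append, List.mem_append]
      constructor
      · rintro (hm | hm)
        · obtain ⟨q, hq, hq2⟩ := List.mem_map.mp hm
          exact Or.inl (hq2 ▸ hrunsnd q hq)
        · exact Or.inr hm
      · rintro (rfl | hm)
        · exact Or.inl (List.mem_map.mpr ⟨p, by rw [hrun_cons]; exact List.mem_cons_self .., rfl⟩)
        · exact Or.inr hm
    rw [PySem.Set.mem_ofList, hmm]
    simp [PySem.Set.mem_ofList]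

theorem runLoop_getD (k : Int) (id : String) :
    ∀ (n : Nat) (l : List (String × String)), l.length ≤ n →
      l.Pairwise (fun p q => toLex (p.2, p.1) ≤ toLex (q.2, q.1)) →
      ∀ res : PySem.Dict String Int,
        (pvRunLoop k res l).getD id 0 = res.getD id 0 + (pvBandCount k id l : Int) := by
  intro n
  induction n with
  | zero =>
    intro l hlen _ res
    have : l = [] := List.length_eq_zero_iff.mp (Nat.le_zero.mp hlen)
    subst this
    simp [pvRunLoop, pvBandCount]
  | succ n ihn =>
    intro l hlen hpw res
    match l with
    | [] => simp [pvRunLoop, pvBandCount]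
    | p :: rest =>
      rw [pvRunLoop]
      have hlen' : ((p :: rest).dropWhile (fun q => q.2 == p.2)).length ≤ n := by
        rw [List.dropWhile_cons, if_pos (by simp)]
        have := List.length_dropWhile_le (fun q : String × String => q.2 == p.2) rest
        simp only [List.length_cons] at hlen
        omega
      have hpw' : ((p :: rest).dropWhile (fun q => q.2 == p.2)).Pairwise
          (fun a b => toLex (a.2, a.1) ≤ toLex (b.2, b.1)) :=
        List.Pairwise.sublist (List.dropWhile_sublist _) hpw
      rw [ihn _ hlen' hpw']
      rw [pvBandCount_step k id p rest hpw]
      by_cases hk : k ≤ (((p :: rest).takeWhile (fun q => q.2 == p.2)).length : Int)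
      · rw [if_pos (by exact hk)]
        rw [innerFold_getD res none _ id (run_fst_pairwise p rest hpw) (by simp)]
        have hnone : (none : Option String) ≠ some id := by simp
        by_cases hmem : id ∈ ((p :: rest).takeWhile (fun q => q.2 == p.2)).map Prod.fst
        · rw [if_pos ⟨hmem, hnone⟩, if_pos ⟨hk, hmem⟩]
          push_cast
          ring
        · rw [if_neg (by tauto), if_neg (by tauto)]
          push_cast
          ring
      · rw [if_neg (by exact hk)]
        rw [if_neg (by tauto)]
        push_cast
        ring

-- pvBandCount only depends on the multiset of pairs
theorem pvBandCount_perm (k : Int) (id : String) (l l' : List (String × String))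
    (h : l.Perm l') : pvBandCount k id l = pvBandCount k id l' := by
  unfold pvBandCount
  apply countP_eq_of_nodup_mem _ _ _ _ (PySem.Set.nodup_ofList _) (PySem.Set.nodup_ofList _)
  intro x
  have hm := h.map Prod.snd
  simp only [PySem.Set.mem_ofList, Bool.and_eq_true, decide_eq_true_eq,
    hm.mem_iff, hm.count_eq, h.mem_iff]

-- A's per-id inner loop also computes pvBandCount
theorem a_value_eq_band (L : List (String × String)) (k : Int) (id : String) :
    ((userOf L).getD id PySem.Set.empty).foldl
      (fun result u =>
        if ((L.map Prod.snd).foldl (fun (d : PySem.Dict String Int) x => d.modify x 0 (· + 1)) PySem.Dict.empty).getD u 0 ≥ k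
        then result + 1 else result) 0
      = (pvBandCount k id L : Int) := by
  rw [PySem.List.foldl_ite_add_one]
  rw [zero_add]
  congr 1
  unfold pvBandCount
  apply countP_eq_of_nodup_mem _ _ _ _ (nodup_userOf L id) (PySem.Set.nodup_ofList _)
  intro x
  have hc : ((L.map Prod.snd).foldl (fun (d : PySem.Dict String Int) x => d.modify x 0 (· + 1)) PySem.Dict.empty).getD x 0
      = (((L.map Prod.snd).count x : Nat) : Int) := by
    rw [PySem.Dict.getD_foldl_modify_add_one]
    simp
  simp only [Bool.and_eq_true, decide_eq_true_eq, mem_userOf, PySem.Set.mem_ofList, hc, ge_iff_le]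
  constructor
  · rintro ⟨hm, hk⟩
    exact ⟨List.mem_map.mpr ⟨(id, x), hm, rfl⟩, hm, hk⟩
  · rintro ⟨_, hm, hk⟩
    exact ⟨hm, hk⟩

-- ===== VERDICT (by name: the statement is the Claim_ definition above) =====
theorem solution_spec : Claim_equal_solution := by
  intro id_list report k _dom _pre
  simp only [Spec_solution, solution, solution_alt]
  have hpair := PySem.List.foldl_prod_mk
      (f := fun (d : PySem.Dict String (PySem.Set String)) i =>
        d.insert (pvSplit2 i).1 (PySem.Set.add (d.getD (pvSplit2 i).1 PySem.Set.empty) (pvSplit2 i).2))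
      (g := fun (d : PySem.Dict String Int) i => d.modify (pvSplit2 i).2 0 (· + 1))
      (l := PySem.Set.ofList report)
      (a := (PySem.Dict.empty : PySem.Dict String (PySem.Set String)))
      (b := (PySem.Dict.empty : PySem.Dict String Int))
  simp only [hpair]
  rw [PySem.List.foldl_append_singleton_eq_map, List.nil_append]
  refine List.map_congr_left ?_
  intro id _
  set L := (PySem.Set.ofList report).map pvSplit2 with hL
  have huser : (PySem.Set.ofList report).foldl
      (fun (d : PySem.Dict String (PySem.Set String)) i =>
        d.insert (pvSplit2 i).1 (PySem.Set.add (d.getD (pvSplit2 i).1 PySem.Set.empty) (pvSplit2 i).2))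
      PySem.Dict.empty = userOf L := by
    unfold userOf
    rw [hL, List.foldl_map]
  have hcntA : (PySem.Set.ofList report).foldl
      (fun (d : PySem.Dict String Int) i => d.modify (pvSplit2 i).2 0 (· + 1))
      PySem.Dict.empty
      = (L.map Prod.snd).foldl (fun (d : PySem.Dict String Int) x => d.modify x 0 (· + 1)) PySem.Dict.empty := by
    rw [hL, List.map_map, List.foldl_map]
    rfl
  simp only [huser, hcntA]
  rw [a_value_eq_band L k id]
  have hsorted := sorted_pairs_pairwise L
  have hperm : (PySem.List.sorted2 L (fun p => p.2) (fun p => p.1) false).Perm L :=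
    PySem.List.sorted2_perm L _ _ false
  rw [runLoop_getD k id (PySem.List.sorted2 L (fun p => p.2) (fun p => p.1) false).length _ le_rfl hsorted]
  rw [PySem.Dict.getD_empty, pvBandCount_perm k id _ L hperm]
  simp
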